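-- pv_equiv track=rewrite | github.com/sirzzang/coding-practice | week02_수식최대화.py | string_to_infix
-- ===== SOURCE A (Python) =====
-- from typing import List
--
-- def string_to_infix(expression: str) -> List[str]:
--     infix = []
--     digit = ''
--     for char in expression:
--         if char.isdigit():
--             digit += char
--         else:
--             infix.append(digit)
--             digit = ''
--             infix.append(char)
--     if digit:
--         infix.append(digit)
--     return infix
-- ===== SOURCE B (Python) =====
-- def string_to_infix(expression):
--     infix = []
--     start = 0
--     for i, c in enumerate(expression):
--         if not c.isdigit():
--             infix.append(expression[start:i])
--             infix.append(c)
--             start = i + 1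
--     if start < len(expression):
--         infix.append(expression[start:])
--     return infix
-- ===== Notes on version B (the rewrite author's own statement) =====
-- stated objective: alternative
-- what changed: Replaces the growing character-accumulator string with an index/two-pointer scan that keeps a slice boundary `start` and emits slices of the input; no equivalence edge cases, same output including the empty-string tokens before leading/adjacent operators.
import Mathlib
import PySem

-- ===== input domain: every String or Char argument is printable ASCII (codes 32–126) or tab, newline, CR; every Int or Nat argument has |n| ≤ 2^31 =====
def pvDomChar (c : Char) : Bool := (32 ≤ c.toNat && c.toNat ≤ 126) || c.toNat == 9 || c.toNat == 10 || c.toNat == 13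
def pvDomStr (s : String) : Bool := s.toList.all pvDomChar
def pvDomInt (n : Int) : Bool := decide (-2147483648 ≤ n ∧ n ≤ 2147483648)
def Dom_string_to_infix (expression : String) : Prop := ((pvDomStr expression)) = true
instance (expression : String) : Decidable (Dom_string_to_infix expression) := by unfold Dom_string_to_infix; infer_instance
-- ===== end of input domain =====

-- B replaces A's growing character-accumulator with an index/two-pointer scan emitting slices; alternative decomposition, same cost.

-- ===== PORT A =====
-- A's loop: state (infix, digit); digit grows char by char, flushed on each non-digit and at the end.
def pvALoop : List Char → List String → List Char → List String
  | [], inf, dig => if dig ≠ [] then inf ++ [String.ofList dig] else inf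
  | c :: cs, inf, dig =>
      if PySem.Chars.isdigit c then pvALoop cs inf (dig ++ [c])
      else pvALoop cs (inf ++ [String.ofList dig, String.ofList [c]]) []

def string_to_infix (expression : String) : List String :=
  pvALoop expression.toList [] []

-- ===== PORT B =====
-- B's loop: state (infix, start); on a non-digit append the slice expression[start:i] and the char, set start := i+1;
-- after the loop append expression[start:] iff start < len(expression). Slices via PySem.List.slice (exact).
def pvBLoop (l : List Char) : List Char → Nat → List String → Nat → List String
  | [], _i, inf, start =>
      if start < l.length then inf ++ [String.ofList (PySem.List.slice l (some (start : Int)) none)] else inf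
  | c :: cs, i, inf, start =>
      if PySem.Chars.isdigit c then pvBLoop l cs (i + 1) inf start
      else pvBLoop l cs (i + 1)
            (inf ++ [String.ofList (PySem.List.slice l (some (start : Int)) (some (i : Int))), String.ofList [c]]) (i + 1)

def string_to_infix_alt (expression : String) : List String :=
  pvBLoop expression.toList expression.toList 0 [] 0

-- ===== PRECONDITION & SPEC =====
def Spec_string_to_infix (expression : String) (out : List String) : Prop := out = string_to_infix_alt expression
instance (expression : String) (out : List String) : Decidable (Spec_string_to_infix expression out) := by unfold Spec_string_to_infix; infer_instance

-- ===== CLAIM (what is proved, stated in full; the proofs are below) =====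
def Claim_equal_string_to_infix : Prop := ∀ (expression : String), Dom_string_to_infix expression → Spec_string_to_infix expression (string_to_infix expression)

-- ===== LEMMAS AND PROOFS =====

-- Invariant: A's accumulated digit equals the slice l[start:i], and cs is the suffix of l at index i.
lemma pvLoop_eq (l : List Char) : ∀ (cs : List Char) (i : Nat) (inf : List String) (dig : List Char) (start : Nat),
    start ≤ i → i ≤ l.length → l.drop i = cs → (l.drop start).take (i - start) = dig →
    pvALoop cs inf dig = pvBLoop l cs i inf start := by
  intro cs
  induction cs with
  | nil =>
    intro i inf dig start hsi hil hdrop hdig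
    have hlen : i = l.length := by
      have := congrArg List.length hdrop
      simp at this
      omega
    subst hlen
    have hdigeq : dig = l.drop start := by
      rw [← hdig]
      exact List.take_of_length_le (by simp)
    simp only [pvALoop, pvBLoop]
    rw [PySem.List.slice_from l (Int.natCast_nonneg start)]
    simp only [Int.toNat_natCast]
    by_cases h : start < l.length
    · have : l.drop start ≠ [] := by
        simp [List.drop_eq_nil_iff]; omega
      rw [if_pos h, if_pos (by rw [hdigeq]; exact this), hdigeq]
    · have : l.drop start = [] := by
        simp [List.drop_eq_nil_iff]; omega
      rw [if_neg h, if_neg (by rw [hdigeq, this]; simp)]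
  | cons c cs ih =>
    intro i inf dig start hsi hil hdrop hdig
    have hilt : i < l.length := by
      by_contra h
      have : l.drop i = [] := by simp [List.drop_eq_nil_iff]; omega
      rw [this] at hdrop; exact (List.cons_ne_nil c cs) hdrop.symm
    have hcons : l.drop i = l[i] :: l.drop (i + 1) := (List.getElem_cons_drop hilt).symm
    rw [hcons] at hdrop
    have hc : c = l[i] := (List.cons.injEq _ _ _ _ ▸ hdrop).1.symm
    have hcs : l.drop (i + 1) = cs := (List.cons.injEq _ _ _ _ ▸ hdrop).2
    simp only [pvALoop, pvBLoop]
    by_cases hd : PySem.Chars.isdigit c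
    · rw [if_pos hd, if_pos hd]
      apply ih (i + 1) inf (dig ++ [c]) start (by omega) (by omega) hcs
      have hk : i - start < (l.drop start).length := by simp; omega
      have : i + 1 - start = (i - start) + 1 := by omega
      rw [this, List.take_add_one, hdig, List.getElem?_eq_getElem hk]
      have hidx : start + (i - start) = i := by omega
      simp [List.getElem_drop, hidx, ← hc]
    · rw [if_neg hd, if_neg hd]
      have hslice : PySem.List.slice l (some (start : Int)) (some (i : Int)) = dig := by
        rw [PySem.List.slice_toNat l (Int.natCast_nonneg start) (Int.natCast_nonneg i)]
        simpa using hdig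
      rw [hslice]
      exact ih (i + 1) _ [] (i + 1) (le_refl _) (by omega) hcs (by simp)

-- ===== VERDICT (by name: the statement is the Claim_ definition above) =====
theorem string_to_infix_spec : Claim_equal_string_to_infix := by
  intro e _hdom
  unfold Spec_string_to_infix string_to_infix string_to_infix_alt
  exact pvLoop_eq e.toList e.toList 0 [] [] 0 (le_refl 0) (Nat.zero_le _) (by simp) (by simp)
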